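-- pv_equiv track=rewrite | github.com/wahhajjaved/large_language_maniacs | downloaded_data/ctssb/cache/transformer_5ff31329ac0d9510dd080db94eb15084141428c9_before.py | gen_dual_const_capacity_batch
-- ===== SOURCE A (Python) =====
-- def pad_seqs(seqs, maxlen=None, PAD_ID=0):
--     maxlen = maxlen or max(len(seq) for seq in seqs)
--     return [seq + [PAD_ID] * (maxlen - len(seq)) for seq in seqs]
--
-- def gen_dual_const_capacity_batch(dual_seq_iter, capacity, PAD_ID=0):
--     """Create paired batches. ((batch1, lengths1), (batch2, lengths2))
--     Each batch does not exceed `capacity` in (batch size) x (max length).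
--     Therefore, total number of tokens the batches can be up to 2 x `capacity`.
--     Args:
--         dual_seq_iter: iterator which gives (seq1, seq2) at each call
--     Returns:
--         ((batch1, lengths1), (batch2, lengths2))
--         batch_i: Shape [batch_size, maxlength_i], DType int
--         lengths_i: Shape [batch_size], DType int
--     """
--
--     seqs1, seqs2 = [], []
--     lens1, lens2 = [], []
--     maxlen1, maxlen2 = 0, 0
--
--     for seq1, seq2 in dual_seq_iter:
--         l1, l2 = len(seq1), len(seq2)
--         if l1 > capacity or l2 > capacity:
--             raise(ValueError, 'Sequence longer than batch capacity. (seq1: {}, seq2: {}, batch capacity: {})'.format(l1, l2, capacity))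
--
--         batch_len = len(seqs1)
--         if max(maxlen1, l1) * (batch_len + 1) > capacity or max(maxlen2, l2) * (batch_len + 1) > capacity:
--             padded1 = pad_seqs(seqs1, maxlen=maxlen1, PAD_ID=PAD_ID)
--             padded2 = pad_seqs(seqs2, maxlen=maxlen2, PAD_ID=PAD_ID)
--             yield ((padded1, lens1), (padded2, lens2))
--
--             seqs1, seqs2 = [], []
--             lens1, lens2 = [], []
--             maxlen1, maxlen2 = 0, 0
--
--         maxlen1, maxlen2 = max(maxlen1, l1), max(maxlen2, l2)
--         seqs1.append(seq1)
--         seqs2.append(seq2)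
--         lens1.append(l1)
--         lens2.append(l2)
--
--     if len(seqs1) > 0:
--         padded1 = pad_seqs(seqs1, maxlen=maxlen1, PAD_ID=PAD_ID)
--         padded2 = pad_seqs(seqs2, maxlen=maxlen2, PAD_ID=PAD_ID)
--         yield ((padded1, lens1), (padded2, lens2))
-- ===== SOURCE B (Python) =====
-- def gen_dual_const_capacity_batch(dual_seq_iter, capacity, PAD_ID=0):
--     def raw_groups():
--         cur, m1, m2 = [], 0, 0
--         for s1, s2 in dual_seq_iter:
--             l1, l2 = len(s1), len(s2)
--             n1, n2 = max(m1, l1), max(m2, l2)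
--             if cur and (n1 * (len(cur) + 1) > capacity or n2 * (len(cur) + 1) > capacity):
--                 yield cur
--                 cur, m1, m2 = [(s1, s2)], l1, l2
--             else:
--                 cur.append((s1, s2))
--                 m1, m2 = n1, n2
--         if cur:
--             yield cur
--
--     def pad(seqs, maxlen):
--         return [s + [PAD_ID] * (maxlen - len(s)) for s in seqs]
--
--     for g in raw_groups():
--         seqs1 = [p[0] for p in g]
--         seqs2 = [p[1] for p in g]
--         lens1 = [len(s) for s in seqs1]
--         lens2 = [len(s) for s in seqs2]
--         yield ((pad(seqs1, max(lens1)), lens1), (pad(seqs2, max(lens2)), lens2))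
-- ===== Notes on version B (the rewrite author's own statement) =====
-- stated objective: alternative
-- what changed: B splits the single interleaved loop (six parallel state lists with padding done at each cut) into two independent stages: a grouping generator that yields raw batches of (seq1,seq2) pairs at the same greedy capacity cuts, and a formatting pass that pads and extracts lengths per group.
import Mathlib
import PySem

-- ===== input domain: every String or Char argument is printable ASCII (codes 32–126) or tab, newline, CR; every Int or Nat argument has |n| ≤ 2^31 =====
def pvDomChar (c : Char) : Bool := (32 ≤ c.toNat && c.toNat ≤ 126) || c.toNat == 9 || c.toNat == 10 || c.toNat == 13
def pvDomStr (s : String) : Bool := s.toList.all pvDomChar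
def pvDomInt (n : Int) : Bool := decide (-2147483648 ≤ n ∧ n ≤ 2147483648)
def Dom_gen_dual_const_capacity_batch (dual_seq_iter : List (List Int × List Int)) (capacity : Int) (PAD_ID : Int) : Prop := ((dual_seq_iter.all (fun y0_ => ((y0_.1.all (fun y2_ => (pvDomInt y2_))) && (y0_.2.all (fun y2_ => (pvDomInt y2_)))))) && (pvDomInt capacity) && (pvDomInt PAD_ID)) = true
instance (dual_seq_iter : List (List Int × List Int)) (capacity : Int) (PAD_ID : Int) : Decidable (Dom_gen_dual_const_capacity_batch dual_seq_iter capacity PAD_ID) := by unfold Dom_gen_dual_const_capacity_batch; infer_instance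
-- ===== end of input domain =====

-- B replaces A's single loop with six parallel state lists by two independent stages
-- (greedy grouping into raw batches, then per-group padding/formatting); same cost, alternative decomposition.


-- ===== PORT A =====
-- pad_seqs: 'maxlen or max(...)' — 0 (and only 0 here) is falsy, so maxlen = 0 recomputes the max.
-- (Python's max over an empty list raises; A only ever calls this with nonempty seqs inside Pre_.)
def padSeqsA (seqs : List (List Int)) (maxlen : Int) (PAD_ID : Int) : List (List Int) :=
  let m : Int := if maxlen = 0 then (seqs.map (fun s => (s.length : Int))).foldl max 0 else maxlen
  seqs.map (fun s => s ++ List.replicate (m - (s.length : Int)).toNat PAD_ID)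

-- the loop of A, state = (seqs1, seqs2, lens1, lens2, maxlen1, maxlen2, accumulated yields).
-- Python raises (a TypeError) when l1 > capacity or l2 > capacity; those inputs are excluded by
-- Pre_gen_dual_const_capacity_batch, the port simply continues there.
def loopA (capacity PAD_ID : Int) :
    List (List Int × List Int) → List (List Int) → List (List Int) → List Int → List Int → Int → Int →
    List ((List (List Int) × List Int) × (List (List Int) × List Int)) →
    List ((List (List Int) × List Int) × (List (List Int) × List Int))
  | [], seqs1, seqs2, lens1, lens2, maxlen1, maxlen2, acc =>
      if seqs1.length > 0 then
        acc ++ [((padSeqsA seqs1 maxlen1 PAD_ID, lens1), (padSeqsA seqs2 maxlen2 PAD_ID, lens2))]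
      else acc
  | (seq1, seq2) :: rest, seqs1, seqs2, lens1, lens2, maxlen1, maxlen2, acc =>
      let l1 : Int := seq1.length
      let l2 : Int := seq2.length
      -- Python's flush branch yields, resets the six state variables, and falls through to the
      -- shared appends; here the appends are written in each branch (applied to the reset state).
      if max maxlen1 l1 * ((seqs1.length : Int) + 1) > capacity ∨
         max maxlen2 l2 * ((seqs1.length : Int) + 1) > capacity then
        loopA capacity PAD_ID rest [seq1] [seq2] [l1] [l2] (max 0 l1) (max 0 l2)
          (acc ++ [((padSeqsA seqs1 maxlen1 PAD_ID, lens1), (padSeqsA seqs2 maxlen2 PAD_ID, lens2))])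
      else
        loopA capacity PAD_ID rest (seqs1 ++ [seq1]) (seqs2 ++ [seq2]) (lens1 ++ [l1]) (lens2 ++ [l2])
          (max maxlen1 l1) (max maxlen2 l2) acc

def gen_dual_const_capacity_batch (dual_seq_iter : List (List Int × List Int)) (capacity : Int) (PAD_ID : Int) : List ((List (List Int) × List Int) × (List (List Int) × List Int)) :=
  loopA capacity PAD_ID dual_seq_iter [] [] [] [] 0 0 []

-- ===== PORT B =====
-- stage 1: greedy grouping into raw batches of (seq1, seq2) pairs (Source B's raw_groups)
def rawGroupsB (capacity : Int) :
    List (List Int × List Int) → List (List Int × List Int) → Int → Int →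
    List (List (List Int × List Int)) → List (List (List Int × List Int))
  | [], cur, _, _, acc => if cur ≠ [] then acc ++ [cur] else acc
  | (s1, s2) :: rest, cur, m1, m2, acc =>
      let l1 : Int := s1.length
      let l2 : Int := s2.length
      let n1 := max m1 l1
      let n2 := max m2 l2
      if cur ≠ [] ∧ (n1 * ((cur.length : Int) + 1) > capacity ∨ n2 * ((cur.length : Int) + 1) > capacity) then
        rawGroupsB capacity rest [(s1, s2)] l1 l2 (acc ++ [cur])
      else
        rawGroupsB capacity rest (cur ++ [(s1, s2)]) n1 n2 acc

-- stage 2: pad a group's sequences to an explicit maximum length (Source B's pad)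
def padB (seqs : List (List Int)) (maxlen : Int) (PAD_ID : Int) : List (List Int) :=
  seqs.map (fun s => s ++ List.replicate (maxlen - (s.length : Int)).toNat PAD_ID)

def fmtB (PAD_ID : Int) (g : List (List Int × List Int)) :
    (List (List Int) × List Int) × (List (List Int) × List Int) :=
  let seqs1 := g.map (·.1)
  let seqs2 := g.map (·.2)
  let lens1 := seqs1.map (fun s => (s.length : Int))
  let lens2 := seqs2.map (fun s => (s.length : Int))
  ((padB seqs1 (lens1.foldl max 0) PAD_ID, lens1), (padB seqs2 (lens2.foldl max 0) PAD_ID, lens2))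

def gen_dual_const_capacity_batch_alt (dual_seq_iter : List (List Int × List Int)) (capacity : Int) (PAD_ID : Int) : List ((List (List Int) × List Int) × (List (List Int) × List Int)) :=
  (rawGroupsB capacity dual_seq_iter [] 0 0 []).map (fmtB PAD_ID)

-- ===== PRECONDITION & SPEC =====
-- Pre_ excludes exactly the inputs on which A raises: some sequence longer than capacity.
def Pre_gen_dual_const_capacity_batch (dual_seq_iter : List (List Int × List Int)) (capacity : Int) (PAD_ID : Int) : Prop :=
  ∀ p ∈ dual_seq_iter, (p.1.length : Int) ≤ capacity ∧ (p.2.length : Int) ≤ capacity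
instance (dual_seq_iter : List (List Int × List Int)) (capacity : Int) (PAD_ID : Int) : Decidable (Pre_gen_dual_const_capacity_batch dual_seq_iter capacity PAD_ID) := by unfold Pre_gen_dual_const_capacity_batch; infer_instance

def pvWitness_gen_dual_const_capacity_batch : (List (List Int × List Int)) × Int × Int :=
  ([([1], [2, 3]), ([4, 5], [6])], 3, 0)

def Spec_gen_dual_const_capacity_batch (dual_seq_iter : List (List Int × List Int)) (capacity : Int) (PAD_ID : Int) (out : List ((List (List Int) × List Int) × (List (List Int) × List Int))) : Prop := out = gen_dual_const_capacity_batch_alt dual_seq_iter capacity PAD_ID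
instance (dual_seq_iter : List (List Int × List Int)) (capacity : Int) (PAD_ID : Int) (out : List ((List (List Int) × List Int) × (List (List Int) × List Int))) : Decidable (Spec_gen_dual_const_capacity_batch dual_seq_iter capacity PAD_ID out) := by unfold Spec_gen_dual_const_capacity_batch; infer_instance

-- ===== CLAIM (what is proved, stated in full; the proofs are below) =====
def Claim_equal_gen_dual_const_capacity_batch : Prop := ∀ (dual_seq_iter : List (List Int × List Int)) (capacity : Int) (PAD_ID : Int), Dom_gen_dual_const_capacity_batch dual_seq_iter capacity PAD_ID → Pre_gen_dual_const_capacity_batch dual_seq_iter capacity PAD_ID → Spec_gen_dual_const_capacity_batch dual_seq_iter capacity PAD_ID (gen_dual_const_capacity_batch dual_seq_iter capacity PAD_ID)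
-- ===== LEMMAS AND PROOFS =====

-- when maxlen is the running maximum of the lengths, A's pad_seqs equals B's pad
lemma padA_eq_padB (seqs : List (List Int)) (m PAD_ID : Int)
    (hm : m = (seqs.map (fun s => (s.length : Int))).foldl max 0) :
    padSeqsA seqs m PAD_ID = padB seqs m PAD_ID := by
  unfold padSeqsA padB
  by_cases h0 : m = 0
  · simp [h0, ← hm]
  · simp [h0]

-- A's flush tuple for a batch equals B's formatting of the raw group
lemma flushA_eq_fmtB (cur : List (List Int × List Int)) (PAD_ID : Int) :
    ((padSeqsA (cur.map (·.1)) ((cur.map (fun p => ((p.1).length : Int))).foldl max 0) PAD_ID,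
        cur.map (fun p => ((p.1).length : Int))),
     (padSeqsA (cur.map (·.2)) ((cur.map (fun p => ((p.2).length : Int))).foldl max 0) PAD_ID,
        cur.map (fun p => ((p.2).length : Int))))
    = fmtB PAD_ID cur := by
  rw [padA_eq_padB _ _ _ (by simp [List.map_map, Function.comp_def]),
      padA_eq_padB _ _ _ (by simp [List.map_map, Function.comp_def])]
  simp [fmtB, List.map_map, Function.comp_def]

-- the central invariant: A's loop state is B's group-in-progress plus formatted accumulator
lemma loop_invariant (capacity PAD_ID : Int) (items : List (List Int × List Int))
    (cur : List (List Int × List Int)) (accG : List (List (List Int × List Int)))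
    (m1 m2 : Int)
    (hm1 : m1 = (cur.map (fun p => ((p.1).length : Int))).foldl max 0)
    (hm2 : m2 = (cur.map (fun p => ((p.2).length : Int))).foldl max 0)
    (hpre : ∀ p ∈ items, (p.1.length : Int) ≤ capacity ∧ (p.2.length : Int) ≤ capacity) :
    loopA capacity PAD_ID items (cur.map (·.1)) (cur.map (·.2))
        (cur.map (fun p => ((p.1).length : Int))) (cur.map (fun p => ((p.2).length : Int)))
        m1 m2 (accG.map (fmtB PAD_ID))
    = (rawGroupsB capacity items cur m1 m2 accG).map (fmtB PAD_ID) := by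
  induction items generalizing cur accG m1 m2 with
  | nil =>
      simp only [loopA, rawGroupsB]
      by_cases hc : cur = []
      · simp [hc]
      · have hlen : (cur.map (·.1)).length > 0 := by
          simpa [List.length_pos_iff] using hc
        rw [if_pos hlen, if_pos hc]
        rw [hm1, hm2, flushA_eq_fmtB]
        simp
  | cons p rest ih =>
      obtain ⟨s1, s2⟩ := p
      have hp := hpre (s1, s2) (by simp)
      have hrest : ∀ q ∈ rest, ((q.1.length : Int) ≤ capacity ∧ (q.2.length : Int) ≤ capacity) :=
        fun q hq => hpre q (by simp [hq])
      have hmax1 : max 0 ((s1.length : Int)) = (s1.length : Int) := max_eq_right (by positivity)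
      have hmax2 : max 0 ((s2.length : Int)) = (s2.length : Int) := max_eq_right (by positivity)
      simp only [loopA, rawGroupsB]
      by_cases hc : cur = []
      · -- empty group in progress: A's cut condition reduces to l > capacity, false under Pre_
        subst hc
        simp only [List.map_nil, List.foldl_nil] at hm1 hm2
        subst hm1; subst hm2
        have hcond : ¬ ((max 0 ((s1.length : Int)) * (((List.map (fun x => x.1) ([] : List (List Int × List Int))).length : Int) + 1) > capacity) ∨
            (max 0 ((s2.length : Int)) * (((List.map (fun x => x.1) ([] : List (List Int × List Int))).length : Int) + 1) > capacity)) := by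
          push_neg
          simp only [List.map_nil, List.length_nil, Nat.cast_zero, zero_add, mul_one, hmax1, hmax2]
          exact ⟨hp.1, hp.2⟩
        rw [if_neg hcond]
        rw [if_neg (by simp)]
        have := ih [(s1, s2)] accG (max 0 (s1.length : Int)) (max 0 (s2.length : Int))
          (by simp) (by simp) hrest
        simpa using this
      · have hlen : ((cur.map (·.1)).length : Int) = (cur.length : Int) := by simp
        by_cases hcond : (max m1 (s1.length : Int) * ((cur.length : Int) + 1) > capacity ∨
            max m2 (s2.length : Int) * ((cur.length : Int) + 1) > capacity)
        · rw [if_pos (by simpa [hlen] using hcond), if_pos ⟨hc, hcond⟩]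
          have := ih [(s1, s2)] (accG ++ [cur]) (max 0 (s1.length : Int)) (max 0 (s2.length : Int))
            (by simp) (by simp) hrest
          rw [hmax1, hmax2] at this
          rw [hm1, hm2, flushA_eq_fmtB]
          simpa using this
        · rw [if_neg (by simpa [hlen] using hcond),
              if_neg (by rintro ⟨-, h⟩; exact hcond h)]
          have := ih (cur ++ [(s1, s2)]) accG (max m1 (s1.length : Int)) (max m2 (s2.length : Int))
            (by rw [hm1]; simp) (by rw [hm2]; simp) hrest
          simpa using this

-- ===== VERDICT (by name: the statement is the Claim_ definition above) =====
theorem gen_dual_const_capacity_batch_spec : Claim_equal_gen_dual_const_capacity_batch := by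
  intro dual_seq_iter capacity PAD_ID _ hpre
  unfold Spec_gen_dual_const_capacity_batch gen_dual_const_capacity_batch gen_dual_const_capacity_batch_alt
  have := loop_invariant capacity PAD_ID dual_seq_iter [] [] 0 0 (by simp) (by simp) hpre
  simpa using this
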